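-- pv_equiv track=rewrite | github.com/Dashuto22/DSA | Arrays_and_Hashing/continuous_subarr_sum.py | continuous_subarr_sum
-- ===== SOURCE A (Python) =====
-- def continuous_subarr_sum(nums, k):
--     remMap = {0:-1}
--     total = 0
--     for i in range(len(nums)):
--         total +=nums[i]
--         rem = total % k
--         if rem not in remMap:
--             remMap[rem] = i
--
--         elif i- remMap[rem]>1:
--             return True
--
--     return False
-- ===== SOURCE B (Python) =====
-- def continuous_subarr_sum(nums, k):
--     # Build the list of prefix-sum remainders (rems[0] = 0 for the empty prefix),
--     # then do a nested scan for two equal remainders at least 2 apart.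
--     rems = [0]
--     total = 0
--     for x in nums:
--         total += x
--         rems.append(total % k)
--     for i in range(len(rems)):
--         for j in range(i):
--             if rems[i] == rems[j] and i - j > 1:
--                 return True
--     return False
-- ===== Notes on version B (the rewrite author's own statement) =====
-- stated objective: alternative
-- what changed: Replaces A's one-pass first-occurrence hashmap with an explicit prefix-remainder list followed by a nested double scan for two equal remainders at distance > 1; equivalent because A's stored first occurrence maximises the index gap.
import Mathlib
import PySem

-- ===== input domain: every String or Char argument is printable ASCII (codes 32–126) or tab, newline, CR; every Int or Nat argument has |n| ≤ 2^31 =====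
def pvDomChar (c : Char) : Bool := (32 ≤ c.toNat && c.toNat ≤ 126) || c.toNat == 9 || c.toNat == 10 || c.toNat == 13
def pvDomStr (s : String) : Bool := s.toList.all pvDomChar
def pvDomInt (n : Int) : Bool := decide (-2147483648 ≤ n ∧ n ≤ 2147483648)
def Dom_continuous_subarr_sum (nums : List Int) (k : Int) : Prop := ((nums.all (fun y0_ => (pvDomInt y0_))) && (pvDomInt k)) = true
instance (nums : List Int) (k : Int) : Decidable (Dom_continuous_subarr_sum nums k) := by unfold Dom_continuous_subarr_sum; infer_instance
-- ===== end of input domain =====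

-- B replaces A's one-pass first-occurrence hashmap with a prefix-remainder list and a
-- nested double scan for two equal remainders more than 1 apart (alternative decomposition,
-- same return value).

-- ===== PORT A =====
-- the for-loop of A: i is the running Python index, total the running sum, m the remMap
def pvALoop (k : Int) : List Int → Int → Int → PySem.Dict Int Int → Bool
  | [], _, _, _ => false
  | x :: rest, i, total, m =>
    let total2 := total + x
    let rem := PySem.Int.mod total2 k
    match m.get? rem with
    | none => pvALoop k rest (i + 1) total2 (m.insert rem i)
    | some j => if i - j > 1 then true else pvALoop k rest (i + 1) total2 m

def continuous_subarr_sum (nums : List Int) (k : Int) : Bool :=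
  pvALoop k nums 0 0 (PySem.Dict.ofList [(0, -1)])

-- ===== PORT B =====
-- first loop of B: build the list of prefix remainders (after the initial [0])
def pvBRems (k : Int) : Int → List Int → List Int
  | _, [] => []
  | total, x :: xs => PySem.Int.mod (total + x) k :: pvBRems k (total + x) xs

def continuous_subarr_sum_alt (nums : List Int) (k : Int) : Bool :=
  let rems := 0 :: pvBRems k 0 nums
  (List.range rems.length).any fun i =>
    (List.range i).any fun j =>
      (rems.getD i 0 == rems.getD j 0) && decide (i - j > 1)

-- ===== PRECONDITION & SPEC =====
-- Pre_ excludes exactly the inputs on which A raises ZeroDivisionError (k == 0 with a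
-- nonempty nums); B raises there too.
def Pre_continuous_subarr_sum (nums : List Int) (k : Int) : Prop := k ≠ 0 ∨ nums = []
instance (nums : List Int) (k : Int) : Decidable (Pre_continuous_subarr_sum nums k) := by
  unfold Pre_continuous_subarr_sum; infer_instance

def pvWitness_continuous_subarr_sum : List Int × Int := ([23, 2, 4, 6, 7], 6)

def Spec_continuous_subarr_sum (nums : List Int) (k : Int) (out : Bool) : Prop := out = continuous_subarr_sum_alt nums k
instance (nums : List Int) (k : Int) (out : Bool) : Decidable (Spec_continuous_subarr_sum nums k out) := by unfold Spec_continuous_subarr_sum; infer_instance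

-- ===== CLAIM (what is proved, stated in full; the proofs are below) =====
def Claim_equal_continuous_subarr_sum : Prop := ∀ (nums : List Int) (k : Int), Dom_continuous_subarr_sum nums k → Pre_continuous_subarr_sum nums k → Spec_continuous_subarr_sum nums k (continuous_subarr_sum nums k)

-- ===== LEMMAS AND PROOFS =====

-- n is the position of the FIRST occurrence of r in L
def pvFirstOcc (L : List Int) (n : Nat) (r : Int) : Prop :=
  n < L.length ∧ L.getD n 0 = r ∧ ∀ s, s < n → L.getD s 0 ≠ r

-- the existence B's double scan decides: two equal entries of L more than 1 apart
def pvPairEx (L : List Int) : Prop :=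
  ∃ t, t < L.length ∧ ∃ s, s < t ∧ L.getD t 0 = L.getD s 0 ∧ t - s > 1

lemma pvGetD_mem (L : List Int) (s : Nat) (h : s < L.length) : L.getD s 0 ∈ L := by
  rw [List.getD_eq_getElem L 0 h]; exact List.getElem_mem h

lemma pvGetD_last (L : List Int) (r : Int) : (L ++ [r]).getD L.length 0 = r := by
  rw [List.getD_append_right L [r] 0 L.length (le_refl _)]; simp

lemma pvPairEx_append (L : List Int) (r : Int) :
    pvPairEx (L ++ [r]) ↔
      pvPairEx L ∨ ∃ s, s < L.length ∧ L.getD s 0 = r ∧ L.length - s > 1 := by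
  constructor
  · rintro ⟨t, ht, s, hst, heq, hgap⟩
    have hlen1 : (L ++ [r]).length = L.length + 1 := by simp
    have hs : s < L.length := by omega
    rcases Nat.lt_or_ge t L.length with htl | htl
    · exact Or.inl ⟨t, htl, s, hst, by
        rwa [List.getD_append _ _ _ _ htl, List.getD_append _ _ _ _ hs] at heq, hgap⟩
    · have htL : t = L.length := by omega
      subst htL
      rw [pvGetD_last, List.getD_append _ _ _ _ hs] at heq
      exact Or.inr ⟨s, hs, heq.symm, hgap⟩
  · rintro (⟨t, ht, s, hst, heq, hgap⟩ | ⟨s, hs, heq, hgap⟩)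
    · have hlen1 : (L ++ [r]).length = L.length + 1 := by simp
      refine ⟨t, by omega, s, hst, ?_, hgap⟩
      rw [List.getD_append _ _ _ _ ht, List.getD_append _ _ _ _ (lt_trans hst ht)]
      exact heq
    · have hlen1 : (L ++ [r]).length = L.length + 1 := by simp
      refine ⟨L.length, by omega, s, hs, ?_, hgap⟩
      rw [pvGetD_last, List.getD_append _ _ _ _ hs]
      exact heq.symm

-- the heart: A's loop (with remMap encoding the first occurrence of each remainder among
-- the prefix remainders L, shifted by -1, and no valid pair inside L yet) returns true
-- exactly when the full remainder list contains a valid pair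
lemma pvALoop_iff (k : Int) : ∀ (rest : List Int) (total : Int) (L : List Int)
    (m : PySem.Dict Int Int)
    (_ : ∀ r, m.get? r = none ↔ r ∉ L)
    (_ : ∀ r j, m.get? r = some j → ∃ n : Nat, j = (n : Int) - 1 ∧ pvFirstOcc L n r)
    (_ : ¬ pvPairEx L),
    (pvALoop k rest ((L.length : Int) - 1) total m = true ↔ pvPairEx (L ++ pvBRems k total rest))
  | [], total, L, m, hnone, hsome, hno => by
    simp [pvALoop, pvBRems, hno]
  | x :: rest, total, L, m, hnone, hsome, hno => by
    have hcons : pvBRems k total (x :: rest)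
        = PySem.Int.mod (total + x) k :: pvBRems k (total + x) rest := rfl
    set r := PySem.Int.mod (total + x) k with hr
    have happ : L ++ pvBRems k total (x :: rest)
        = (L ++ [r]) ++ pvBRems k (total + x) rest := by
      rw [hcons]; simp
    rw [happ]
    cases hget : m.get? r with
    | none =>
      have hrmem : r ∉ L := (hnone r).mp hget
      have hnone' : ∀ r', (m.insert r ((L.length : Int) - 1)).get? r' = none ↔ r' ∉ L ++ [r] := by
        intro r'
        rw [PySem.Dict.get?_insert]
        by_cases h : r' = r
        · subst h; simp
        · simp [h, hnone r']
      have hsome' : ∀ r' j, (m.insert r ((L.length : Int) - 1)).get? r' = some j →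
          ∃ n : Nat, j = (n : Int) - 1 ∧ pvFirstOcc (L ++ [r]) n r' := by
        intro r' j hj
        rw [PySem.Dict.get?_insert] at hj
        by_cases h : r' = r
        · subst h
          simp at hj
          refine ⟨L.length, by omega, by simp, pvGetD_last L r, ?_⟩
          intro s hs
          rw [List.getD_append _ _ _ _ hs]
          intro hc; exact hrmem (hc ▸ pvGetD_mem L s hs)
        · rw [if_neg h] at hj
          obtain ⟨n, hn, hlt, hval, hfirst⟩ := hsome r' j hj
          refine ⟨n, hn, by simp; omega, ?_, ?_⟩
          · rw [List.getD_append _ _ _ _ hlt]; exact hval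
          · intro s hs
            rw [List.getD_append _ _ _ _ (lt_trans hs hlt)]
            exact hfirst s hs
      have hno' : ¬ pvPairEx (L ++ [r]) := by
        rw [pvPairEx_append]
        rintro (h | ⟨s, hs, heq, _⟩)
        · exact hno h
        · exact hrmem (heq ▸ pvGetD_mem L s hs)
      have ih := pvALoop_iff k rest (total + x) (L ++ [r])
        (m.insert r ((L.length : Int) - 1)) hnone' hsome' hno'
      have hlen : ((L ++ [r]).length : Int) - 1 = ((L.length : Int) - 1) + 1 := by
        simp
      rw [hlen] at ih
      rw [← ih]
      simp only [pvALoop, ← hr, hget]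
    | some j =>
      obtain ⟨n, hjn, hlt, hval, hfirst⟩ := hsome r j hget
      subst hjn
      by_cases hgap : ((L.length : Int) - 1) - ((n : Int) - 1) > 1
      · have hl1 : (L ++ [r]).length = L.length + 1 := by simp
        have hl2 : ((L ++ [r]) ++ pvBRems k (total + x) rest).length
            = (L ++ [r]).length + (pvBRems k (total + x) rest).length := List.length_append
        have hP : pvPairEx ((L ++ [r]) ++ pvBRems k (total + x) rest) := by
          refine ⟨L.length, by omega, n, hlt, ?_, by omega⟩
          have e1 := List.getD_append (L ++ [r]) (pvBRems k (total + x) rest) 0 L.length (by omega)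
          have e2 := List.getD_append (L ++ [r]) (pvBRems k (total + x) rest) 0 n (by omega)
          have e3 := List.getD_append L [r] 0 n hlt
          rw [e1, e2, pvGetD_last, e3]
          exact hval.symm
        simp only [pvALoop, ← hr, hget, if_pos hgap]
        rw [List.append_assoc] at hP
        simpa using hP
      · have hn1 : n = L.length - 1 := by omega
        have hno' : ¬ pvPairEx (L ++ [r]) := by
          rw [pvPairEx_append]
          rintro (h | ⟨s, hs, heq, hg⟩)
          · exact hno h
          · have hsn : s < n := by omega
            exact hfirst s hsn heq
        have hnone' : ∀ r', m.get? r' = none ↔ r' ∉ L ++ [r] := by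
          intro r'
          rw [hnone r']
          by_cases h : r' = r
          · subst h
            constructor
            · intro hc; exact absurd (hval ▸ pvGetD_mem L n hlt) hc
            · intro hc; exact absurd (by simp) hc
          · simp [h]
        have hsome' : ∀ r' j', m.get? r' = some j' →
            ∃ n' : Nat, j' = (n' : Int) - 1 ∧ pvFirstOcc (L ++ [r]) n' r' := by
          intro r' j' hj'
          obtain ⟨n', hn', hlt', hval', hfirst'⟩ := hsome r' j' hj'
          refine ⟨n', hn', by simp; omega, ?_, ?_⟩
          · rw [List.getD_append _ _ _ _ hlt']; exact hval'
          · intro s hs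
            rw [List.getD_append _ _ _ _ (lt_trans hs hlt')]
            exact hfirst' s hs
        have ih := pvALoop_iff k rest (total + x) (L ++ [r]) m hnone' hsome' hno'
        have hlen : ((L ++ [r]).length : Int) - 1 = ((L.length : Int) - 1) + 1 := by
          simp
        rw [hlen] at ih
        rw [← ih]
        simp only [pvALoop, ← hr, hget, if_neg hgap]

lemma pvA_iff (nums : List Int) (k : Int) :
    continuous_subarr_sum nums k = true ↔ pvPairEx (0 :: pvBRems k 0 nums) := by
  have hd : PySem.Dict.ofList [((0 : Int), (-1 : Int))]
      = PySem.Dict.empty.insert 0 (-1) := by decide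
  have hnone : ∀ r, (PySem.Dict.ofList [((0 : Int), (-1 : Int))]).get? r = none ↔ r ∉ [(0 : Int)] := by
    intro r
    rw [hd, PySem.Dict.get?_insert]
    by_cases h : r = 0 <;> simp [h, PySem.Dict.get?_empty]
  have hsome : ∀ r j, (PySem.Dict.ofList [((0 : Int), (-1 : Int))]).get? r = some j →
      ∃ n : Nat, j = (n : Int) - 1 ∧ pvFirstOcc [(0 : Int)] n r := by
    intro r j hj
    rw [hd, PySem.Dict.get?_insert] at hj
    by_cases h : r = 0
    · subst h
      simp at hj
      refine ⟨0, by omega, ?_⟩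
      exact ⟨by simp, rfl, by omega⟩
    · simp [h, PySem.Dict.get?_empty] at hj
  have hno : ¬ pvPairEx [(0 : Int)] := by
    rintro ⟨t, ht, s, hst, _⟩
    simp at ht; omega
  have h := pvALoop_iff k nums 0 [(0 : Int)]
    (PySem.Dict.ofList [((0 : Int), (-1 : Int))]) hnone hsome hno
  simpa [continuous_subarr_sum] using h

lemma pvB_iff (nums : List Int) (k : Int) :
    continuous_subarr_sum_alt nums k = true ↔ pvPairEx (0 :: pvBRems k 0 nums) := by
  simp only [continuous_subarr_sum_alt, pvPairEx, List.any_eq_true, List.mem_range,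
    Bool.and_eq_true, beq_iff_eq, decide_eq_true_eq]

-- ===== VERDICT (by name: the statement is the Claim_ definition above) =====
theorem continuous_subarr_sum_spec : Claim_equal_continuous_subarr_sum := by
  intro nums k _ _
  unfold Spec_continuous_subarr_sum
  have hA := pvA_iff nums k
  have hB := pvB_iff nums k
  cases hA' : continuous_subarr_sum nums k <;> cases hB' : continuous_subarr_sum_alt nums k <;>
    simp_all
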